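-- pv_equiv track=rewrite | github.com/xuzuochao/- | card_number_positioning/num_segment.py | print_calculate_ave
-- ===== SOURCE A (Python) =====
-- def print_calculate_ave(trough_list, seg_pos_start, seg_pos_end):
--     """根据是否是波谷判断分割线的平均距离, 以该列像素点总数是否比scope范围内的每一列白色像素点总数小作为依据
--
--     :param trough_list: 所有的波谷位置
--     :param seg_pos_start: 分割起始位置
--     :param seg_pos_end: 分割结束位置
--     :return: 分割线距离平均值
--     """
--
--     cur_seg = seg_pos_start
--     # 可信间距，保证两天线之间只有一个数字
--     trust_dis = 0
--     # 保存所有间隔用于求平均间隔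
--     means = []
--     while cur_seg + 1 <= seg_pos_end:
--         # 依次判断下一列是否是分割线
--         next_seg = cur_seg + 1
--         # 分割线不能超过图像宽度
--         if next_seg >= len(trough_list) - 1:
--             break
--
--         # 如果为波谷就判断为分割点，当有可信线段时距离置0，从新开始计算数字间距
--         if trough_list[next_seg] == 1:
--             if trust_dis != 0:
--                 means.append(trust_dis)
--                 trust_dis = 0
--
--         # 若没有分割线则代表为数字区域，计算单个数字区域宽度
--         else:
--             trust_dis += 1
--
--         cur_seg = next_seg
--
--     # 计算数字平均宽度
--     mean = int(sum(means) / len(means))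
--
--     return mean
-- ===== SOURCE B (Python) =====
-- def print_calculate_ave(trough_list, seg_pos_start, seg_pos_end):
--     """Marker-position decomposition: collect the positions of trough markers
--     in the examined window, then derive each gap width from consecutive
--     marker positions instead of counting with a running accumulator."""
--     stop = min(seg_pos_end, len(trough_list) - 2)
--     marks = [i for i in range(seg_pos_start + 1, stop + 1) if trough_list[i] == 1]
--     gaps = []
--     prev = seg_pos_start
--     for m in marks:
--         if m - prev - 1 > 0:
--             gaps.append(m - prev - 1)
--         prev = m
--     return int(sum(gaps) / len(gaps))
-- ===== Notes on version B (the rewrite author's own statement) =====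
-- stated objective: alternative
-- what changed: A counts gap widths with a running trust_dis accumulator inside the scanning while-loop; B first collects the marker (trough==1) positions of the examined window and then derives each gap width as the difference of consecutive marker positions, with no running width counter.
import Mathlib
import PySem

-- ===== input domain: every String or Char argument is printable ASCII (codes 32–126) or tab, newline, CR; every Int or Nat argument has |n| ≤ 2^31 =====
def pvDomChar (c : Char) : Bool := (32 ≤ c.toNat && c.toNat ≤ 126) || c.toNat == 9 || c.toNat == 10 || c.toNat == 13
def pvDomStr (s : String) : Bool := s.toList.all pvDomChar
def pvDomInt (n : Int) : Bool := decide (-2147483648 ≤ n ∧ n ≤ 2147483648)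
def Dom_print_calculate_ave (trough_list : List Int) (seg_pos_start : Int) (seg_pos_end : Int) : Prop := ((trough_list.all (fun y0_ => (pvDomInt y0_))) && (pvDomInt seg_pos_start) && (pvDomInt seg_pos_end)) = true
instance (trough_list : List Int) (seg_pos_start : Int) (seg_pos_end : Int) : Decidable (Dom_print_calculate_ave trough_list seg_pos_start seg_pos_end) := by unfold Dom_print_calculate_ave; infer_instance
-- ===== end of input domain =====

-- B replaces A's running-distance accumulator loop by a marker-position decomposition
-- (collect marker indices, then read each gap off consecutive marker positions); objective: alternative.

-- ===== PORT A =====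
-- the while-loop of A: state (cur_seg, trust_dis, means); returns the final means list.
-- On an index where Python would raise IndexError, pyGet? is none and we stop (excluded by Pre_).
def pvALoop (tl : List Int) (e : Int) (cur trust : Int) (means : List Int) : List Int :=
  if _h : cur + 1 ≤ e then
    if cur + 1 ≥ (tl.length : Int) - 1 then means
    else
      match PySem.List.pyGet? tl (cur + 1) with
      | some v =>
        if v = 1 then
          if trust ≠ 0 then pvALoop tl e (cur + 1) 0 (means ++ [trust])
          else pvALoop tl e (cur + 1) trust means
        else pvALoop tl e (cur + 1) (trust + 1) means
      | none => means
  else means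
termination_by (e - cur).toNat
decreasing_by all_goals omega

-- int(sum(means)/len(means)): sum ≥ 0, so truncation = floor division; len = 0 (ZeroDivisionError)
-- is excluded by Pre_.
def print_calculate_ave (trough_list : List Int) (seg_pos_start : Int) (seg_pos_end : Int) : Int :=
  let means := pvALoop trough_list seg_pos_end seg_pos_start 0 []
  PySem.Int.floordiv means.sum (means.length : Int)

-- ===== PORT B =====
def pvBStep (acc : List Int × Int) (m : Int) : List Int × Int :=
  if m - acc.2 - 1 > 0 then (acc.1 ++ [m - acc.2 - 1], m) else (acc.1, m)

def print_calculate_ave_alt (trough_list : List Int) (seg_pos_start : Int) (seg_pos_end : Int) : Int :=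
  let stop := min seg_pos_end ((trough_list.length : Int) - 2)
  let marks := (PySem.List.pyRange (seg_pos_start + 1) (stop + 1) 1).filter
      (fun i => PySem.List.pyGet? trough_list i == some 1)
  let gaps := (marks.foldl pvBStep ([], seg_pos_start)).1
  PySem.Int.floordiv gaps.sum (gaps.length : Int)

-- ===== PRECONDITION & SPEC =====
-- Pre_ = exactly the inputs where Python A returns: the first examined index is a valid (possibly
-- negative, Python-wrapping) index unless the examined window is empty (else IndexError), and the
-- window contains a marker preceded by a non-marker, so means is nonempty (else ZeroDivisionError).
def Pre_print_calculate_ave (trough_list : List Int) (seg_pos_start : Int) (seg_pos_end : Int) : Prop :=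
  (min seg_pos_end ((trough_list.length : Int) - 2) < seg_pos_start + 1 ∨
    -(trough_list.length : Int) ≤ seg_pos_start + 1) ∧
  (∃ j ∈ PySem.List.pyRange (seg_pos_start + 1) (min seg_pos_end ((trough_list.length : Int) - 2) + 1) 1,
      PySem.List.pyGet? trough_list j = some 1 ∧
      ∃ i ∈ PySem.List.pyRange (seg_pos_start + 1) j 1, PySem.List.pyGet? trough_list i ≠ some 1)
instance (trough_list : List Int) (seg_pos_start : Int) (seg_pos_end : Int) : Decidable (Pre_print_calculate_ave trough_list seg_pos_start seg_pos_end) := by unfold Pre_print_calculate_ave; infer_instance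

def pvWitness_print_calculate_ave : List Int × Int × Int := ([0, 1, 0, 0, 1, 0, 0], 0, 6)

def Spec_print_calculate_ave (trough_list : List Int) (seg_pos_start : Int) (seg_pos_end : Int) (out : Int) : Prop := out = print_calculate_ave_alt trough_list seg_pos_start seg_pos_end
instance (trough_list : List Int) (seg_pos_start : Int) (seg_pos_end : Int) (out : Int) : Decidable (Spec_print_calculate_ave trough_list seg_pos_start seg_pos_end out) := by unfold Spec_print_calculate_ave; infer_instance

-- ===== CLAIM (what is proved, stated in full; the proofs are below) =====
def Claim_equal_print_calculate_ave : Prop := ∀ (trough_list : List Int) (seg_pos_start : Int) (seg_pos_end : Int), Dom_print_calculate_ave trough_list seg_pos_start seg_pos_end → Pre_print_calculate_ave trough_list seg_pos_start seg_pos_end → Spec_print_calculate_ave trough_list seg_pos_start seg_pos_end (print_calculate_ave trough_list seg_pos_start seg_pos_end)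

-- ===== LEMMAS AND PROOFS =====

-- Loop correspondence: A's accumulator loop equals B's fold over the filtered marker positions,
-- under the invariant trust = cur - prev (the number of non-markers seen since the last marker).
lemma pvLoop_eq (tl : List Int) (e : Int) (n : Nat) :
    ∀ (cur trust : Int) (means : List Int) (prev : Int),
      (min e ((tl.length : Int) - 2) - cur).toNat ≤ n →
      trust = cur - prev → 0 ≤ trust →
      (cur + 1 ≤ min e ((tl.length : Int) - 2) → -(tl.length : Int) ≤ cur + 1) →
      pvALoop tl e cur trust means =
        (((PySem.List.pyRange (cur + 1) (min e ((tl.length : Int) - 2) + 1) 1).filter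
            (fun i => PySem.List.pyGet? tl i == some 1)).foldl pvBStep (means, prev)).1 := by
  induction n with
  | zero =>
    intro cur trust means prev hn htr htnn hv
    have hstop : min e ((tl.length : Int) - 2) + 1 ≤ cur + 1 := by omega
    rw [PySem.List.pyRange_one_eq_nil hstop]
    rw [pvALoop]
    simp only [List.filter_nil, List.foldl_nil]
    split
    · have : cur + 1 ≥ (tl.length : Int) - 1 := by omega
      simp [this]
    · rfl
  | succ n ih =>
    intro cur trust means prev hn htr htnn hv
    set stop := min e ((tl.length : Int) - 2) with hstopdef
    by_cases h : cur + 1 ≤ stop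
    · have he : cur + 1 ≤ e := by omega
      have hval : PySem.Raise.InRange tl.length (cur + 1) := ⟨hv h, by omega⟩
      obtain ⟨v, hsome⟩ : ∃ v, PySem.List.pyGet? tl (cur + 1) = some v := by
        rcases hx : PySem.List.pyGet? tl (cur + 1) with _ | v
        · rw [PySem.List.pyGet?_eq_none_iff] at hx; exact absurd hval hx
        · exact ⟨v, rfl⟩
      have hcons : PySem.List.pyRange (cur + 1) (stop + 1) 1
          = (cur + 1) :: PySem.List.pyRange (cur + 1 + 1) (stop + 1) 1 :=
        PySem.List.pyRange_one_cons (by omega)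
      rw [pvALoop, dif_pos he, if_neg (by omega), hcons, List.filter_cons]
      simp only [hsome]
      have hv' : (cur + 1) + 1 ≤ stop → -(tl.length : Int) ≤ (cur + 1) + 1 := by
        intro h2; have := hv (by omega); omega
      by_cases hv1 : v = 1
      · subst hv1
        rw [if_pos rfl]
        simp only [beq_self_eq_true, if_true]
        rw [List.foldl_cons]
        have hstep : pvBStep (means, prev) (cur + 1) =
            if trust = 0 then (means, cur + 1) else (means ++ [trust], cur + 1) := by
          by_cases ht : trust = 0
          · rw [if_pos ht]
            simp only [pvBStep]
            rw [if_neg (by omega)]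
          · rw [if_neg ht]
            simp only [pvBStep]
            rw [if_pos (by omega)]
            have : cur + 1 - prev - 1 = trust := by omega
            rw [this]
        rw [hstep]
        by_cases ht : trust = 0
        · rw [if_neg (by omega), if_pos ht]
          exact ih (cur + 1) trust means (cur + 1) (by omega) (by omega) htnn hv'
        · rw [if_pos ht, if_neg ht]
          exact ih (cur + 1) 0 (means ++ [trust]) (cur + 1) (by omega) (by omega) le_rfl hv'
      · rw [if_neg hv1, if_neg (by simp [hv1])]
        exact ih (cur + 1) (trust + 1) means prev (by omega) (by omega) (by omega) hv'
    · have hstop : stop + 1 ≤ cur + 1 := by omega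
      rw [PySem.List.pyRange_one_eq_nil hstop, pvALoop]
      simp only [List.filter_nil, List.foldl_nil]
      split
      · have : cur + 1 ≥ (tl.length : Int) - 1 := by omega
        simp [this]
      · rfl

-- ===== VERDICT (by name: the statement is the Claim_ definition above) =====
theorem print_calculate_ave_spec : Claim_equal_print_calculate_ave := by
  intro tl s e _ hpre
  unfold Spec_print_calculate_ave print_calculate_ave print_calculate_ave_alt
  have hmeans := pvLoop_eq tl e (min e ((tl.length : Int) - 2) - s).toNat s 0 [] s
    (le_refl _) (by omega) (le_refl _) (fun h => by rcases hpre.1 with h1 | h1 <;> omega)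
  rw [hmeans]
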